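-- pv_equiv track=rewrite | github.com/folk85/projectEuler-solutions | dem.py | get_magn
-- ===== SOURCE A (Python) =====
-- def get_magn(num,magn=0):
--     """docstring for get_magn"""
--     a = num // 10
--     if (a > 0):
--         if (a > 9):
--             magn = get_magn(a) + 1
--         else:
--             magn = 1
--     return magn
-- ===== SOURCE B (Python) =====
-- def get_magn(num, magn=0):
--     if num < 10:
--         return magn
--     return len(str(num)) - 1
-- ===== Notes on version B (the rewrite author's own statement) =====
-- stated objective: idiomatic
-- what changed: Replaces the digit-stripping recursion with a guard for num<10 (returning the passed magn, as A does) and a direct len(str(num))-1 digit count for num>=10.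
import Mathlib
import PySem

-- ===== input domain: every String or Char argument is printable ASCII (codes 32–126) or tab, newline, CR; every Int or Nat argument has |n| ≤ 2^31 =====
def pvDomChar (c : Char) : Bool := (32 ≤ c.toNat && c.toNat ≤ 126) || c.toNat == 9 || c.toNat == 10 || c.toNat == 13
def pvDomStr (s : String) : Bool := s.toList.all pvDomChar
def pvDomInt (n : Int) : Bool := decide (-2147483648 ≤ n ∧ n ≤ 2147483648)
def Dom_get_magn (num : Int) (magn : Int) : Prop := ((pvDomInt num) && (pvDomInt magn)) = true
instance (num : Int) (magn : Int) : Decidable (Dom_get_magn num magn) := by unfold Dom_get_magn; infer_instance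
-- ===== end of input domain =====

-- B computes the magnitude as len(str(num))-1 instead of A's digit-stripping recursion
-- (returning the passed magn for num < 10 exactly as A does); objective: idiomatic.

-- ===== PORT A =====
-- termination helper for the recursive port: num // 10 shrinks when positive
theorem pv_floordiv_lt (num : Int) (h : 0 < PySem.Int.floordiv num 10) :
    (PySem.Int.floordiv num 10).toNat < num.toNat := by
  rw [PySem.Int.floordiv_eq_ediv_of_pos (by omega : (0:Int) < 10)] at *
  omega

def get_magn (num : Int) (magn : Int) : Int :=
  let a := PySem.Int.floordiv num 10
  if h : a > 0 then
    if a > 9 then get_magn a 0 + 1 else 1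
  else magn
termination_by num.toNat
decreasing_by exact pv_floordiv_lt num h

-- ===== PORT B =====
def get_magn_alt (num : Int) (magn : Int) : Int :=
  if num < 10 then magn
  else PySem.Str.len (PySem.Int.toStr num) - 1

-- ===== PRECONDITION & SPEC =====
def Spec_get_magn (num : Int) (magn : Int) (out : Int) : Prop := out = get_magn_alt num magn
instance (num : Int) (magn : Int) (out : Int) : Decidable (Spec_get_magn num magn out) := by unfold Spec_get_magn; infer_instance

-- ===== CLAIM (what is proved, stated in full; the proofs are below) =====
def Claim_equal_get_magn : Prop := ∀ (num : Int) (magn : Int), Dom_get_magn num magn → Spec_get_magn num magn (get_magn num magn)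

-- ===== LEMMAS AND PROOFS =====

-- exact length of Nat.toDigitsCore: log₁₀ n + 1 digits are pushed on top of the accumulator
theorem pv_toDigitsCore_length (n : Nat) : ∀ (f : Nat) (l : List Char), n < f →
    (Nat.toDigitsCore 10 f n l).length = Nat.log 10 n + 1 + l.length := by
  induction n using Nat.strong_induction_on with
  | _ n ih =>
    intro f l hf
    match f with
    | 0 => omega
    | f + 1 =>
      rw [Nat.toDigitsCore]
      by_cases h10 : n / 10 = 0
      · have hn : n < 10 := by omega
        have hz : Nat.log 10 n = 0 := by rw [Nat.log_eq_zero_iff]; left; omega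
        simp [h10, hz]
        omega
      · have hn : 10 ≤ n := by omega
        simp only [h10, if_false]
        have hlt : n / 10 < n := by omega
        rw [ih (n / 10) hlt f _ (by omega)]
        have hlog : Nat.log 10 (n / 10) = Nat.log 10 n - 1 := Nat.log_div_base 10 n
        have hpos : 0 < Nat.log 10 n := Nat.log_pos (by omega) hn
        simp [hlog]
        omega

theorem pv_toStr_length (n : Int) (h : 10 ≤ n) :
    PySem.Str.len (PySem.Int.toStr n) = (Nat.log 10 n.toNat : Int) + 1 := by
  rw [PySem.Str.len_eq, PySem.Int.toList_toStr]
  unfold PySem.Int.toChars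
  rw [if_neg (by omega)]
  unfold Nat.toDigits
  rw [pv_toDigitsCore_length n.toNat (n.toNat + 1) [] (by omega)]
  simp

-- A's recursion computes log₁₀ for num ≥ 10
theorem pv_get_magn_log_aux (k : Nat) : ∀ (num magn : Int), num.toNat ≤ k → 10 ≤ num →
    get_magn num magn = (Nat.log 10 num.toNat : Int) := by
  induction k with
  | zero => intro num magn hk h; omega
  | succ k ih' =>
    intro n magn hk h
    have ih : ∀ (m mg : Int), m.toNat ≤ k → 10 ≤ m → get_magn m mg = (Nat.log 10 m.toNat : Int) := ih'
    rw [get_magn]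
    have hfd : PySem.Int.floordiv n 10 = n / 10 :=
      PySem.Int.floordiv_eq_ediv_of_pos (by omega)
    have hpos : 0 < n / 10 := by omega
    rw [hfd]
    rw [dif_pos hpos]
    by_cases hbig : n / 10 > 9
    · rw [if_pos hbig]
      rw [ih (n / 10) 0 (by omega) (by omega), ← hfd]
      have : (n / 10).toNat = n.toNat / 10 := by omega
      rw [hfd, this]
      have hlog : Nat.log 10 (n.toNat / 10) = Nat.log 10 n.toNat - 1 :=
        Nat.log_div_base 10 n.toNat
      have hlp : 0 < Nat.log 10 n.toNat := Nat.log_pos (by omega) (by omega)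
      rw [hlog]
      omega
    · rw [if_neg hbig]
      -- 10 ≤ n ≤ 99, so log₁₀ n = 1
      have h1 : Nat.log 10 n.toNat = 1 := by
        have : n.toNat < 100 := by omega
        have h10 : 10 ≤ n.toNat := by omega
        have := Nat.log_div_base 10 n.toNat
        have hz : Nat.log 10 (n.toNat / 10) = 0 := by
          rw [Nat.log_eq_zero_iff]; left; omega
        have hlp : 0 < Nat.log 10 n.toNat := Nat.log_pos (by omega) h10
        omega
      rw [h1]; rfl

theorem pv_get_magn_log (num : Int) (magn : Int) (h : 10 ≤ num) :
    get_magn num magn = (Nat.log 10 num.toNat : Int) :=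
  pv_get_magn_log_aux num.toNat num magn le_rfl h

-- ===== VERDICT (by name: the statement is the Claim_ definition above) =====
theorem get_magn_spec : Claim_equal_get_magn := by
  intro num magn _
  unfold Spec_get_magn get_magn_alt
  by_cases h : num < 10
  · rw [if_pos h, get_magn]
    have : ¬ (0 < PySem.Int.floordiv num 10) := by
      rw [PySem.Int.floordiv_eq_ediv_of_pos (by omega : (0:Int) < 10)]
      omega
    rw [dif_neg this]
  · rw [if_neg h, pv_get_magn_log num magn (by omega),
        pv_toStr_length num (by omega)]
    omega
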